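-- pv_equiv track=rewrite | github.com/mortlach/key-drag | src_cython/word_model.py | create_word_dataOLD
-- ===== SOURCE A (Python) =====
-- def create_word_dataOLD(runes_index, wli_data):
--     '''
--         splits rune and wli data by word so they can be looked up in individual wordlists to we find hamming distance
--         each item of return list is passed with wordlist to hamming_funciton
--     :param runes_index: e.g.[7, 18, 20, 5, 3, 19, 18, 7]
--     :param wli_data: e.g. [[0, 3], [1, 3], [2, 3], [0, 2], [1, 2], [0, 7], [1, 7], [3, 7]]
--     :return: will give   [[7, 18, 20, 5, 3, 19, 18], [7]] , [[[0, 7], [1, 7], [2, 7], [3, 7], [4, 7], [5, 7], [6, 7]], [[0, 7]]]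
--     '''
--     nextrunes = []
--     nextwli = []
--     return_wli = []
--     return_runes = []
--     for i in range(len(runes_index)):
--         if wli_data[i][0] == 0:
--             if nextrunes:  # Check if nextrunes is not empty before appending to word_data
--                 return_runes.append(nextrunes)
--                 return_wli.append(nextwli)
--             nextwli = [wli_data[i]]
--             nextrunes = [runes_index[i]]
--         else:
--             nextwli.append(wli_data[i])
--             nextrunes.append(runes_index[i])
--     # Append the last group
--     if nextrunes:
--         return_runes.append(nextrunes)
--         return_wli.append(nextwli)
--     return return_runes,return_wli
-- ===== SOURCE B (Python) =====
-- def create_word_dataOLD(runes_index, wli_data):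
--     # two-phase: find word start boundaries, then slice both lists between boundaries
--     n = len(runes_index)
--     starts = [i for i in range(n) if wli_data[i][0] == 0]
--     if n and (not starts or starts[0] != 0):
--         starts.insert(0, 0)
--     ends = starts[1:] + [n]
--     return ([runes_index[a:b] for a, b in zip(starts, ends)],
--             [wli_data[a:b] for a, b in zip(starts, ends)])
-- ===== Notes on version B (the rewrite author's own statement) =====
-- stated objective: simpler
-- what changed: Replaces A's single-pass loop with four mutable accumulators by a two-phase decomposition: first collect the word-start boundaries (indices where wli_data[i][0]==0, with 0 prepended), then slice both input lists between consecutive boundaries.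
import Mathlib
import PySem

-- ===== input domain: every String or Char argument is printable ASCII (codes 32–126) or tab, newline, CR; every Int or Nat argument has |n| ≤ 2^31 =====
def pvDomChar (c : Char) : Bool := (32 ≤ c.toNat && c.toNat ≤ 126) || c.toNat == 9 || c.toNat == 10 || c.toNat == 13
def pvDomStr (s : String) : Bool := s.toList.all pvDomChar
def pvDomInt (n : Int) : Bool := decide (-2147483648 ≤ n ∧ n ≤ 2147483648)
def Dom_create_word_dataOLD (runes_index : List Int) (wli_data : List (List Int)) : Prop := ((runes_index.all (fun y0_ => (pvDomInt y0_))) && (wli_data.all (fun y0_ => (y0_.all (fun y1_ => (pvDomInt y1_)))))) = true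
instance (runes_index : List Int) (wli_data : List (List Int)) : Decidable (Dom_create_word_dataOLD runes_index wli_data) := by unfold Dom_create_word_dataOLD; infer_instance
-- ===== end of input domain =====

-- B replaces A's one-pass accumulator loop by a two-phase decomposition (collect word-start
-- boundaries, then slice between consecutive boundaries); objective: alternative/simpler structure.

-- ===== PORT A =====
-- state: ((nextrunes, nextwli), (return_runes, return_wli))
def create_word_dataOLD (runes_index : List Int) (wli_data : List (List Int)) : List (List Int) × List (List (List Int)) :=
  let fin := (PySem.List.pyRange 0 runes_index.length 1).foldl
    (fun (st : (List Int × List (List Int)) × (List (List Int) × List (List (List Int)))) i =>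
      let ri := PySem.List.pyGetD runes_index i 0          -- runes_index[i] (in range under Pre_)
      let wi := PySem.List.pyGetD wli_data i []            -- wli_data[i]   (in range under Pre_)
      if PySem.List.pyGetD wi 0 0 == 0 then                -- wli_data[i][0] == 0 (nonempty under Pre_)
        if st.1.1 ≠ [] then
          (([ri], [wi]), (st.2.1 ++ [st.1.1], st.2.2 ++ [st.1.2]))
        else
          (([ri], [wi]), (st.2.1, st.2.2))
      else
        ((st.1.1 ++ [ri], st.1.2 ++ [wi]), (st.2.1, st.2.2)))
    (([], []), ([], []))
  if fin.1.1 ≠ [] then (fin.2.1 ++ [fin.1.1], fin.2.2 ++ [fin.1.2]) else (fin.2.1, fin.2.2)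

-- ===== PORT B =====
def create_word_dataOLD_alt (runes_index : List Int) (wli_data : List (List Int)) : List (List Int) × List (List (List Int)) :=
  let n : Int := runes_index.length
  let starts := (PySem.List.pyRange 0 n 1).filter
    (fun i => PySem.List.pyGetD (PySem.List.pyGetD wli_data i []) 0 0 == 0)
  let starts := if n ≠ 0 ∧ (starts = [] ∨ starts.head? ≠ some 0) then 0 :: starts else starts
  let ends := PySem.List.slice starts (some 1) none ++ [n]     -- starts[1:] + [n]
  let se := starts.zip ends
  (se.map (fun p => PySem.List.slice runes_index (some p.1) (some p.2)),
   se.map (fun p => PySem.List.slice wli_data (some p.1) (some p.2)))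

-- ===== PRECONDITION & SPEC =====
-- Pre_: exactly the inputs on which the Python A returns (A raises IndexError when wli_data is
-- shorter than runes_index or some wli_data[i] scanned by the loop is empty); B raises there too.
def Pre_create_word_dataOLD (runes_index : List Int) (wli_data : List (List Int)) : Prop :=
  runes_index.length ≤ wli_data.length ∧
    ∀ l ∈ wli_data.take runes_index.length, l ≠ []
instance (runes_index : List Int) (wli_data : List (List Int)) : Decidable (Pre_create_word_dataOLD runes_index wli_data) := by unfold Pre_create_word_dataOLD; infer_instance
def pvWitness_create_word_dataOLD : List Int × List (List Int) :=
  ([7, 18, 20, 5, 3, 19, 18, 7], [[0, 3], [1, 3], [2, 3], [0, 2], [1, 2], [0, 7], [1, 7], [3, 7]])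
def Spec_create_word_dataOLD (runes_index : List Int) (wli_data : List (List Int)) (out : List (List Int) × List (List (List Int))) : Prop := out = create_word_dataOLD_alt runes_index wli_data
instance (runes_index : List Int) (wli_data : List (List Int)) (out : List (List Int) × List (List (List Int))) : Decidable (Spec_create_word_dataOLD runes_index wli_data out) := by unfold Spec_create_word_dataOLD; infer_instance

-- ===== CLAIM (what is proved, stated in full; the proofs are below) =====
def Claim_equal_create_word_dataOLD : Prop := ∀ (runes_index : List Int) (wli_data : List (List Int)), Dom_create_word_dataOLD runes_index wli_data → Pre_create_word_dataOLD runes_index wli_data → Spec_create_word_dataOLD runes_index wli_data (create_word_dataOLD runes_index wli_data)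


-- ===== LEMMAS AND PROOFS =====

def pvIsZ (p : Int × List Int) : Bool := PySem.List.pyGetD p.2 0 0 == 0
def pvCut : List (Int × List Int) → List (Int × List Int) × List (List (Int × List Int))
  | [] => ([], [])
  | p :: l =>
    let r := pvCut l
    if pvIsZ p then ([], (p :: r.1) :: r.2) else (p :: r.1, r.2)
def pvGrp (l : List (Int × List Int)) : List (List (Int × List Int)) :=
  if (pvCut l).1 = [] then (pvCut l).2 else (pvCut l).1 :: (pvCut l).2
def pvZs : List (Int × List Int) → List Nat
  | [] => []
  | p :: l => if pvIsZ p then 0 :: (pvZs l).map (· + 1) else (pvZs l).map (· + 1)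
def pvStepA (st : (List Int × List (List Int)) × (List (List Int) × List (List (List Int))))
    (p : Int × List Int) :
    (List Int × List (List Int)) × (List (List Int) × List (List (List Int))) :=
  if pvIsZ p then
    if st.1.1 ≠ [] then (([p.1], [p.2]), (st.2.1 ++ [st.1.1], st.2.2 ++ [st.1.2]))
    else (([p.1], [p.2]), (st.2.1, st.2.2))
  else ((st.1.1 ++ [p.1], st.1.2 ++ [p.2]), (st.2.1, st.2.2))

theorem pv_foldl_range_getD {α β σ : Type} (g : σ → α → β → σ) (d1 : α) (d2 : β) :
    ∀ (l1 : List α) (l2 : List β) (init : σ), l1.length ≤ l2.length →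
    (List.range l1.length).foldl (fun s k => g s (l1.getD k d1) (l2.getD k d2)) init
      = (l1.zip l2).foldl (fun s p => g s p.1 p.2) init := by
  intro l1
  induction l1 with
  | nil => intro l2 init h; simp
  | cons x l1' ih =>
    intro l2 init h
    cases l2 with
    | nil => simp at h
    | cons y l2' =>
      simp only [List.length_cons, List.range_succ_eq_map, List.foldl_cons, List.foldl_map,
        List.getD_cons_zero, List.getD_cons_succ, List.zip_cons_cons]
      exact ih l2' (g init x y) (by simpa using h)

theorem pv_filter_range (l : List (Int × List Int)) (d : Int × List Int) :
    (List.range l.length).filter (fun k => pvIsZ (l.getD k d)) = pvZs l := by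
  induction l with
  | nil => simp [pvZs]
  | cons p l' ih =>
    simp only [List.length_cons, List.range_succ_eq_map, List.filter_cons, List.getD_cons_zero,
      List.filter_map, pvZs]
    by_cases hz : pvIsZ p
    · simp [hz, Function.comp_def, ← ih]
    · simp [hz, Function.comp_def, ← ih]

theorem pv_zs_lt (l : List (Int × List Int)) : ∀ x ∈ pvZs l, x < l.length := by
  induction l with
  | nil => simp [pvZs]
  | cons p l' ih =>
    intro x hx
    simp only [pvZs] at hx
    split at hx
    · rcases List.mem_cons.mp hx with h | hx'
      · simp [h]
      · obtain ⟨y, hy, rfl⟩ := List.mem_map.mp hx'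
        have := ih y hy; simp; omega
    · obtain ⟨y, hy, rfl⟩ := List.mem_map.mp hx
      have := ih y hy; simp; omega

theorem pv_headD_map_succ (s : List Nat) (m : Nat) :
    (s.map (· + 1)).headD (m + 1) = s.headD m + 1 := by
  cases s <;> rfl

theorem pv_cut_fst (l : List (Int × List Int)) :
    (pvCut l).1 = l.take ((pvZs l).headD l.length) := by
  induction l with
  | nil => rfl
  | cons p l' ih =>
    simp only [pvCut, pvZs]
    by_cases hz : pvIsZ p
    · simp [hz]
    · simp only [hz, if_neg, Bool.false_eq_true, ite_false, List.length_cons,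
        pv_headD_map_succ, List.take_succ_cons, ih]

-- shifted zip of boundary pairs

theorem pv_zip0 (s : List Nat) (m : Nat) :
    (0 :: s.map (· + 1)).zip ((s ++ [m]).map (· + 1))
      = (0, s.headD m + 1) :: (s.map (· + 1)).zip ((s.tail ++ [m]).map (· + 1)) := by
  cases s <;> simp

theorem pv_shift (p : Int × List Int) (l' : List (Int × List Int)) (s : List Nat) :
    ((s.map (· + 1)).zip ((s.tail ++ [l'.length]).map (· + 1))).map
        (fun ab => ((p :: l').drop ab.1).take (ab.2 - ab.1))
      = (s.zip (s.tail ++ [l'.length])).map (fun ab => (l'.drop ab.1).take (ab.2 - ab.1)) := by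
  rw [List.zip_map, List.map_map]
  simp [Function.comp_def, Prod.map, Nat.succ_sub_succ]

theorem pv_chunksZ (l : List (Int × List Int)) :
    ((pvZs l).zip ((pvZs l).tail ++ [l.length])).map
        (fun ab => (l.drop ab.1).take (ab.2 - ab.1)) = (pvCut l).2 := by
  induction l with
  | nil => rfl
  | cons p l' ih =>
    simp only [pvZs, pvCut, List.length_cons]
    by_cases hz : pvIsZ p
    · simp only [hz, if_true, List.tail_cons]
      have e2 : (pvZs l').map (· + 1) ++ [l'.length + 1]
          = ((pvZs l') ++ [l'.length]).map (· + 1) := by simp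
      rw [e2, pv_zip0, List.map_cons, pv_shift p l' (pvZs l'), ih, pv_cut_fst l']
      simp
    · simp only [hz, Bool.false_eq_true, if_false]
      have e2 : ((pvZs l').map (· + 1)).tail ++ [l'.length + 1]
          = ((pvZs l').tail ++ [l'.length]).map (· + 1) := by
        rw [← List.map_tail]; simp
      rw [e2, pv_shift p l' (pvZs l'), ih]

theorem pv_words (l : List (Int × List Int)) (s' : List Nat)
    (hs' : s' = if l ≠ [] ∧ (pvZs l = [] ∨ (pvZs l).head? ≠ some 0) then 0 :: pvZs l else pvZs l) :
    (s'.zip (s'.tail ++ [l.length])).map (fun ab => (l.drop ab.1).take (ab.2 - ab.1))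
      = pvGrp l := by
  cases l with
  | nil =>
    subst hs'; simp [pvZs, pvGrp, pvCut]
  | cons p l' =>
    by_cases hz : pvIsZ p
    · -- first row is a zero row: 0 is already the first boundary
      have hzs : pvZs (p :: l') = 0 :: (pvZs l').map (· + 1) := by simp [pvZs, hz]
      have hcond : ¬((p :: l') ≠ [] ∧ (pvZs (p :: l') = [] ∨ (pvZs (p :: l')).head? ≠ some 0)) := by
        simp [hzs]
      rw [if_neg hcond] at hs'
      subst hs'
      rw [pv_chunksZ]
      have h1 : (pvCut (p :: l')).1 = [] := by simp [pvCut, hz]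
      simp [pvGrp, h1]
    · have hzs : pvZs (p :: l') = (pvZs l').map (· + 1) := by simp [pvZs, hz]
      have hc1 : (pvCut (p :: l')).1 = p :: (pvCut l').1 := by simp [pvCut, hz]
      have hc2 : (pvCut (p :: l')).2 = (pvCut l').2 := by simp [pvCut, hz]
      cases hs : pvZs l' with
      | nil =>
        have hzs' : pvZs (p :: l') = [] := by rw [hzs, hs]; rfl
        have hcond : ((p :: l') ≠ [] ∧ (pvZs (p :: l') = [] ∨ (pvZs (p :: l')).head? ≠ some 0)) := by
          simp [hzs']
        rw [if_pos hcond, hzs'] at hs'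
        subst hs'
        have hcut2 : (pvCut l').2 = [] := by
          have h := pv_chunksZ l'; rw [hs] at h; simpa using h.symm
        have hcut1 : (pvCut l').1 = l' := by
          rw [pv_cut_fst l', hs]; simp
        simp [pvGrp, hc1, hc2, hcut1, hcut2, List.take_of_length_le]
      | cons b s0 =>
        have hzs' : pvZs (p :: l') = (b + 1) :: s0.map (· + 1) := by rw [hzs, hs]; rfl
        have hcond : ((p :: l') ≠ [] ∧ (pvZs (p :: l') = [] ∨ (pvZs (p :: l')).head? ≠ some 0)) := by
          simp [hzs']
        rw [if_pos hcond, hzs'] at hs'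
        subst hs'
        simp only [List.tail_cons, List.zip_cons_cons, List.map_cons, List.drop_zero,
          Nat.sub_zero, List.length_cons]
        have e1 : (b + 1) :: s0.map (· + 1) = (b :: s0).map (· + 1) := by simp
        rw [e1]
        rw [show (b :: s0).map (· + 1) ++ [l'.length + 1] = ((b :: s0) ++ [l'.length]).map (· + 1)
          from by simp]
        rw [pv_zip0 (b :: s0) l'.length, List.map_cons, pv_shift p l' (b :: s0)]
        have ih2 := pv_chunksZ l'
        rw [hs] at ih2
        rw [ih2]
        rw [pv_cut_fst l', hs] at hc1
        have hne : (pvCut (p :: l')).1 ≠ [] := by rw [hc1]; simp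
        unfold pvGrp
        rw [if_neg hne, hc1, hc2]
        simp

theorem pv_foldA (l : List (Int × List Int)) :
    ∀ (q : List (Int × List Int)) (rr : List (List Int)) (rw : List (List (List Int))),
    (let fin := l.foldl pvStepA ((q.map Prod.fst, q.map Prod.snd), (rr, rw));
      if fin.1.1 ≠ [] then (fin.2.1 ++ [fin.1.1], fin.2.2 ++ [fin.1.2]) else (fin.2.1, fin.2.2))
      = (rr ++ (if q ++ (pvCut l).1 = [] then (pvCut l).2 else (q ++ (pvCut l).1) :: (pvCut l).2).map (List.map Prod.fst),
         rw ++ (if q ++ (pvCut l).1 = [] then (pvCut l).2 else (q ++ (pvCut l).1) :: (pvCut l).2).map (List.map Prod.snd)) := by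
  induction l with
  | nil =>
    intro q rr rw
    by_cases hq : q = []
    · subst hq; simp [pvCut]
    · have h1 : q.map Prod.fst ≠ [] := by simpa using hq
      simp [pvCut, hq, h1]
  | cons p l' ih =>
    intro q rr rw
    by_cases hz : pvIsZ p
    · have hstep : pvStepA ((q.map Prod.fst, q.map Prod.snd), (rr, rw)) p
          = (([p].map Prod.fst, [p].map Prod.snd),
             (rr ++ (if q = [] then [] else [q.map Prod.fst]),
              rw ++ (if q = [] then [] else [q.map Prod.snd]))) := by
        by_cases hq : q = []
        · subst hq; simp [pvStepA, hz]
        · have h1 : q.map Prod.fst ≠ [] := by simpa using hq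
          simp [pvStepA, hz, hq, h1]
      simp only [List.foldl_cons, hstep]
      rw [ih [p] _ _]
      have hc : pvCut (p :: l') = ([], (p :: (pvCut l').1) :: (pvCut l').2) := by
        simp [pvCut, hz]
      rw [hc]
      by_cases hq : q = []
      · subst hq; simp
      · simp [hq]
    · have hstep : pvStepA ((q.map Prod.fst, q.map Prod.snd), (rr, rw)) p
          = (((q ++ [p]).map Prod.fst, (q ++ [p]).map Prod.snd), (rr, rw)) := by
        simp [pvStepA, hz]
      simp only [List.foldl_cons, hstep]
      rw [ih (q ++ [p]) _ _]
      have hc : pvCut (p :: l') = (p :: (pvCut l').1, (pvCut l').2) := by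
        simp [pvCut, hz]
      rw [hc]
      simp

theorem pvA_fold_eq (runes_index : List Int) (wli_data : List (List Int))
    (h : runes_index.length ≤ wli_data.length)
    (init : (List Int × List (List Int)) × (List (List Int) × List (List (List Int)))) :
    (List.range runes_index.length).foldl (fun st k =>
        if PySem.List.pyGetD (wli_data.getD k []) 0 0 == 0 then
          if st.1.1 ≠ [] then
            (([runes_index.getD k 0], [wli_data.getD k []]), (st.2.1 ++ [st.1.1], st.2.2 ++ [st.1.2]))
          else (([runes_index.getD k 0], [wli_data.getD k []]), (st.2.1, st.2.2))
        else ((st.1.1 ++ [runes_index.getD k 0], st.1.2 ++ [wli_data.getD k []]), (st.2.1, st.2.2))) init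
      = (runes_index.zip wli_data).foldl pvStepA init :=
  pv_foldl_range_getD (fun st a b => pvStepA st (a, b)) 0 [] runes_index wli_data init h

theorem pvA_eq (runes_index : List Int) (wli_data : List (List Int))
    (h : runes_index.length ≤ wli_data.length) :
    create_word_dataOLD runes_index wli_data
      = ((pvGrp (runes_index.zip wli_data)).map (List.map Prod.fst),
         (pvGrp (runes_index.zip wli_data)).map (List.map Prod.snd)) := by
  simp only [create_word_dataOLD, PySem.List.pyRange_zero_natCast, List.foldl_map,
    PySem.List.pyGetD_natCast]
  rw [pvA_fold_eq runes_index wli_data h]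
  have := pv_foldA (runes_index.zip wli_data) [] [] []
  simp only [List.map_nil, List.nil_append] at this
  rw [this]
  simp only [pvGrp]

theorem pv_map_snd_zip (r : List Int) : ∀ (w : List (List Int)),
    (r.zip w).map Prod.snd = w.take r.length := by
  induction r with
  | nil => intro w; simp
  | cons x r' ih => intro w; cases w <;> simp [ih]

theorem pvB_core (runes_index : List Int) (wli_data : List (List Int))
    (h : runes_index.length ≤ wli_data.length) (s' : List Nat)
    (hs' : s' = if (runes_index.zip wli_data) ≠ [] ∧
        (pvZs (runes_index.zip wli_data) = [] ∨ (pvZs (runes_index.zip wli_data)).head? ≠ some 0)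
      then 0 :: pvZs (runes_index.zip wli_data) else pvZs (runes_index.zip wli_data)) :
    (((s'.map (fun k : Nat => (k : Int))).zip
        (PySem.List.slice (s'.map (fun k : Nat => (k : Int))) (some 1) none ++ [(runes_index.length : Int)])).map
          (fun p => PySem.List.slice runes_index (some p.1) (some p.2)),
     ((s'.map (fun k : Nat => (k : Int))).zip
        (PySem.List.slice (s'.map (fun k : Nat => (k : Int))) (some 1) none ++ [(runes_index.length : Int)])).map
          (fun p => PySem.List.slice wli_data (some p.1) (some p.2)))
      = ((pvGrp (runes_index.zip wli_data)).map (List.map Prod.fst),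
         (pvGrp (runes_index.zip wli_data)).map (List.map Prod.snd)) := by
  have hl : (runes_index.zip wli_data).length = runes_index.length := by
    rw [List.length_zip]; exact Nat.min_eq_left h
  have hE : PySem.List.slice (s'.map (fun k : Nat => (k : Int))) (some 1) none
        ++ [(runes_index.length : Int)]
      = (s'.tail ++ [runes_index.length]).map (fun k : Nat => (k : Int)) := by
    rw [PySem.List.slice_from_one, ← List.map_tail]; simp
  rw [hE, ← hl, List.zip_map, List.map_map, List.map_map,
    ← pv_words (runes_index.zip wli_data) s' hs']
  -- bound on the right ends of the boundary pairs
  have hbound : ∀ ab ∈ s'.zip (s'.tail ++ [(runes_index.zip wli_data).length]),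
      ab.2 ≤ (runes_index.zip wli_data).length := by
    intro ab hab
    have h2 := (List.of_mem_zip hab).2
    rcases List.mem_append.mp h2 with h3 | h3
    · have h4 : ab.2 ∈ s' := List.mem_of_mem_tail h3
      rw [hs'] at h4
      have h5 : ab.2 = 0 ∨ ab.2 ∈ pvZs (runes_index.zip wli_data) := by
        split at h4
        · rcases List.mem_cons.mp h4 with h6 | h6
          · exact Or.inl h6
          · exact Or.inr h6
        · exact Or.inr h4
      rcases h5 with h6 | h6
      · simp [h6]
      · exact le_of_lt (pv_zs_lt _ _ h6)
    · simp only [List.mem_singleton] at h3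
      exact le_of_eq h3
  refine congrArg₂ Prod.mk ?_ ?_
  · rw [List.map_map]
    apply List.map_congr_left
    intro ab hab
    simp only [Function.comp_def, Prod.map_fst, Prod.map_snd, PySem.List.slice_natCast]
    rw [List.map_take, List.map_drop, List.map_fst_zip h]
  · rw [List.map_map]
    apply List.map_congr_left
    intro ab hab
    simp only [Function.comp_def, Prod.map_fst, Prod.map_snd, PySem.List.slice_natCast]
    rw [List.map_take, List.map_drop, pv_map_snd_zip]
    rw [List.drop_take, List.take_take]
    have hb := hbound ab hab
    rw [hl] at hb
    rw [Nat.min_eq_left (Nat.sub_le_sub_right hb _)]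

theorem pvB_eq (runes_index : List Int) (wli_data : List (List Int))
    (h : runes_index.length ≤ wli_data.length) :
    create_word_dataOLD_alt runes_index wli_data
      = ((pvGrp (runes_index.zip wli_data)).map (List.map Prod.fst),
         (pvGrp (runes_index.zip wli_data)).map (List.map Prod.snd)) := by
  have hl : (runes_index.zip wli_data).length = runes_index.length := by
    rw [List.length_zip]; exact Nat.min_eq_left h
  have h1 : (PySem.List.pyRange 0 (runes_index.length : Int) 1).filter
      (fun i => PySem.List.pyGetD (PySem.List.pyGetD wli_data i []) 0 0 == 0)
      = (pvZs (runes_index.zip wli_data)).map (fun k : Nat => (k : Int)) := by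
    rw [PySem.List.pyRange_zero_natCast, List.filter_map]
    congr 1
    rw [← pv_filter_range (runes_index.zip wli_data) (0, []), hl]
    apply List.filter_congr
    intro k hk
    have hk' : k < runes_index.length := List.mem_range.mp hk
    have hkw : k < wli_data.length := lt_of_lt_of_le hk' h
    have hkz : k < (runes_index.zip wli_data).length := by rw [hl]; exact hk'
    simp only [Function.comp_def, PySem.List.pyGetD_natCast]
    rw [List.getD_eq_getElem _ _ hkz, List.getElem_zip]
    unfold pvIsZ
    rw [List.getD_eq_getElem _ _ hkw]
  have hiff : ((runes_index.length : Int) ≠ 0 ∧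
        ((pvZs (runes_index.zip wli_data)).map (fun k : Nat => (k : Int)) = [] ∨
         ((pvZs (runes_index.zip wli_data)).map (fun k : Nat => (k : Int))).head? ≠ some 0))
      ↔ ((runes_index.zip wli_data) ≠ [] ∧
        (pvZs (runes_index.zip wli_data) = [] ∨ (pvZs (runes_index.zip wli_data)).head? ≠ some 0)) := by
    have hA : ((runes_index.length : Int) ≠ 0) ↔ (runes_index.zip wli_data) ≠ [] := by
      rw [ne_eq, Int.natCast_eq_zero, ← hl, List.length_eq_zero_iff]
    have hC : ((pvZs (runes_index.zip wli_data)).map (fun k : Nat => (k : Int))).head? ≠ some 0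
        ↔ (pvZs (runes_index.zip wli_data)).head? ≠ some 0 := by
      cases pvZs (runes_index.zip wli_data) <;> simp
    rw [hA, hC]
    simp
  simp only [create_word_dataOLD_alt, h1]
  by_cases hc : ((runes_index.zip wli_data) ≠ [] ∧
      (pvZs (runes_index.zip wli_data) = [] ∨ (pvZs (runes_index.zip wli_data)).head? ≠ some 0))
  · rw [if_pos (hiff.mpr hc)]
    have e0 : (0 : Int) :: (pvZs (runes_index.zip wli_data)).map (fun k : Nat => (k : Int))
        = (0 :: pvZs (runes_index.zip wli_data)).map (fun k : Nat => (k : Int)) := by simp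
    rw [e0]
    exact pvB_core runes_index wli_data h _ (by rw [if_pos hc])
  · rw [if_neg (fun hx => hc (hiff.mp hx))]
    exact pvB_core runes_index wli_data h _ (by rw [if_neg hc])

-- ===== VERDICT (by name: the statement is the Claim_ definition above) =====
theorem create_word_dataOLD_spec : Claim_equal_create_word_dataOLD := by
  intro runes wli _dom hpre
  unfold Spec_create_word_dataOLD
  rw [pvA_eq runes wli hpre.1, pvB_eq runes wli hpre.1]
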